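-- pv_equiv track=rewrite | github.com/8nxtt4vhhd-ship-it/numat-ai | backend/main.py | build_crm_activity_map
-- ===== SOURCE A (Python) =====
-- from collections import Counter, defaultdict
--
-- def build_crm_activity_map(activities):
--     activity_map = defaultdict(list)
--
--     for activity in activities:
--         key = str(activity.get("customer_primary_key") or "").strip()
--
--         if not key:
--             continue
--
--         activity_map[key].append(activity)
--
--     for key, items in activity_map.items():
--         activity_map[key] = sorted(
--             items,
--             key=lambda activity: activity.get("date_created", ""),
--             reverse=True,
--         )
--
--     return activity_map
-- ===== SOURCE B (Python) =====
-- def build_crm_activity_map(activities):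
--     keyed = [(str(a.get("customer_primary_key") or "").strip(), a) for a in activities]
--     keys = list(dict.fromkeys(k for k, _ in keyed if k))
--     return {
--         k: sorted(
--             (a for kk, a in keyed if kk == k),
--             key=lambda a: a.get("date_created", ""),
--             reverse=True,
--         )
--         for k in keys
--     }
-- ===== Notes on version B (the rewrite author's own statement) =====
-- stated objective: alternative
-- what changed: A accumulates groups into a defaultdict in one pass and then re-sorts each group in place over items(); B instead computes the deduped first-appearance key list once and builds the result directly as a dict comprehension mapping each key to the sorted filter of its activities.
import Mathlib
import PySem

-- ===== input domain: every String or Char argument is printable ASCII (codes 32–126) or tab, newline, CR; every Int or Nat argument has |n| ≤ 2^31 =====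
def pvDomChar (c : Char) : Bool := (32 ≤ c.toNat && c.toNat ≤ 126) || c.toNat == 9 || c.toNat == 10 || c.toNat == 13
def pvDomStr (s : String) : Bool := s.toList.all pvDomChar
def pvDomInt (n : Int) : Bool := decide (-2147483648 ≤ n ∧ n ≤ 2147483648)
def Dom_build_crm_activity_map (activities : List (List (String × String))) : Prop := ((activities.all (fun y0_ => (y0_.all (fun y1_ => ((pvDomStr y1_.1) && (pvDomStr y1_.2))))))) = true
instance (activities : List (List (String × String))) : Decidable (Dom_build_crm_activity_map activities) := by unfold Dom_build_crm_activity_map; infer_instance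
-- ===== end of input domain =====

-- B replaces A's dict-accumulate-then-sort-each-group-in-place scheme with a direct dict
-- comprehension over the deduped first-appearance keys, each paired with the sorted filter
-- of its activities (alternative decomposition; not claimed faster).

-- key = str(activity.get("customer_primary_key") or "").strip()  (values are str, so `or ""` only matters for missing/empty)
def pvKeyOf (a : List (String × String)) : String :=
  PySem.Str.strip (((PySem.Dict.mk a).get? "customer_primary_key").getD "")

-- activity.get("date_created", "")
def pvDate (a : List (String × String)) : String :=
  (PySem.Dict.mk a).getD "date_created" ""

-- ===== PORT A =====
def build_crm_activity_map (activities : List (List (String × String))) : List (String × List (List (String × String))) :=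
  -- first loop: activity_map = defaultdict(list); activity_map[key].append(activity)
  let m := activities.foldl (fun m a =>
      let key := pvKeyOf a
      if key = "" then m
      else m.modify key [] (fun items => items ++ [a]))
    PySem.Dict.empty
  -- second loop: activity_map[key] = sorted(items, key=..., reverse=True) over a snapshot of items()
  let m2 := m.items.foldl (fun d p =>
      d.insert p.1 (PySem.List.sorted p.2 (fun a => pvDate a) true)) m
  m2.items

-- ===== PORT B =====
def build_crm_activity_map_alt (activities : List (List (String × String))) : List (String × List (List (String × String))) :=
  let keyed := activities.map (fun a => (pvKeyOf a, a))
  let keys := PySem.List.dedup ((keyed.map Prod.fst).filter (fun k => k ≠ ""))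
  -- dict comprehension {k: sorted([a for kk, a in keyed if kk == k], key=..., reverse=True) for k in keys}
  let d := keys.foldl (fun d k =>
      d.insert k (PySem.List.sorted ((keyed.filter (fun p => p.1 == k)).map Prod.snd)
        (fun a => pvDate a) true)) PySem.Dict.empty
  d.items

-- ===== PRECONDITION & SPEC =====
def Spec_build_crm_activity_map (activities : List (List (String × String))) (out : List (String × List (List (String × String)))) : Prop := out = build_crm_activity_map_alt activities
instance (activities : List (List (String × String))) (out : List (String × List (List (String × String)))) : Decidable (Spec_build_crm_activity_map activities out) := by unfold Spec_build_crm_activity_map; infer_instance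

-- ===== CLAIM (what is proved, stated in full; the proofs are below) =====
def Claim_equal_build_crm_activity_map : Prop := ∀ (activities : List (List (String × String))), Dom_build_crm_activity_map activities → Spec_build_crm_activity_map activities (build_crm_activity_map activities)

-- ===== LEMMAS AND PROOFS =====

-- the (key, activity) pairs that A's first loop actually records
def pvPairs (xs : List (List (String × String))) : List (String × List (String × String)) :=
  xs.filterMap (fun a => if pvKeyOf a = "" then none else some (pvKeyOf a, a))

-- A's first loop is the grouping fold over pvPairs
theorem pvL1 (xs : List (List (String × String))) (m : PySem.Dict String (List (List (String × String)))) :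
    xs.foldl (fun m a =>
      let key := pvKeyOf a
      if key = "" then m
      else m.modify key [] (fun items => items ++ [a])) m
    = (pvPairs xs).foldl (fun d p => d.modify p.1 [] (fun items => items ++ [p.2])) m := by
  induction xs generalizing m with
  | nil => rfl
  | cons a t ih =>
    simp only [List.foldl_cons, pvPairs, List.filterMap_cons]
    by_cases h : pvKeyOf a = "" <;> simp [h, ih, pvPairs]

-- an insert-fold leaves keys it never touches alone
theorem pvL2' {V W : Type} (g : V → W) (l : List (String × V)) (d : PySem.Dict String W) (k : String)
    (h : k ∉ l.map Prod.fst) :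
    (l.foldl (fun d p => d.insert p.1 (g p.2)) d).get? k = d.get? k := by
  induction l generalizing d with
  | nil => rfl
  | cons p t ih =>
    simp only [List.map_cons, List.mem_cons, not_or] at h
    rw [List.foldl_cons, ih _ h.2, PySem.Dict.get?_insert]; simp [h.1]

-- an insert-fold over nodup keys gives each key its own inserted value
theorem pvL2 {V W : Type} (g : V → W) (l : List (String × V)) (d : PySem.Dict String W) (k : String) (v : V)
    (hnd : (l.map Prod.fst).Nodup) (hm : (k, v) ∈ l) :
    (l.foldl (fun d p => d.insert p.1 (g p.2)) d).get? k = some (g v) := by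
  induction l generalizing d with
  | nil => cases hm
  | cons p t ih =>
    simp only [List.map_cons, List.nodup_cons] at hnd
    rcases List.mem_cons.mp hm with h | h
    · obtain rfl : p = (k, v) := h.symm
      rw [List.foldl_cons, pvL2' g t _ k hnd.1, PySem.Dict.get?_insert_self]
    · rw [List.foldl_cons]; exact ih _ hnd.2 h

theorem pvL4 (xs : List (List (String × String))) :
    (pvPairs xs).map Prod.fst = (xs.map pvKeyOf).filter (fun k => k ≠ "") := by
  induction xs with
  | nil => rfl
  | cons a t ih =>
    simp only [pvPairs, List.filterMap_cons, List.map_cons, List.filter_cons] at *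
    by_cases h : pvKeyOf a = "" <;> simp [h, ih]

theorem pvL5 (xs : List (List (String × String))) (k : String) (hk : k ≠ "") :
    (pvPairs xs).filter (fun p => p.1 == k) = (xs.map (fun a => (pvKeyOf a, a))).filter (fun p => p.1 == k) := by
  induction xs with
  | nil => rfl
  | cons a t ih =>
    simp only [pvPairs, List.filterMap_cons, List.map_cons, List.filter_cons] at *
    by_cases h : pvKeyOf a = ""
    · simp [h, ih, Ne.symm hk]
    · by_cases h2 : pvKeyOf a = k
      · subst h2; rw [if_neg hk]; simp [ih]
      · simp [h, h2, ih]

-- ===== VERDICT (by name: the statement is the Claim_ definition above) =====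
theorem build_crm_activity_map_spec : Claim_equal_build_crm_activity_map := by
  intro activities _
  unfold Spec_build_crm_activity_map
  simp only [build_crm_activity_map, build_crm_activity_map_alt]
  rw [pvL1]
  set P := pvPairs activities with hP
  set m : PySem.Dict String (List (List (String × String))) :=
    P.foldl (fun d p => d.modify p.1 [] (fun items => items ++ [p.2])) PySem.Dict.empty with hm
  have hkeys : m.keys = PySem.Set.ofList (P.map Prod.fst) := by
    rw [hm, PySem.Dict.keys_foldl_modify_key P Prod.fst [] (fun _ p => (fun items => items ++ [p.2]))]
    rw [PySem.Dict.keys_empty, PySem.Set.update_nil_left]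
  have hnd : m.keys.Nodup := by
    rw [hm]
    exact PySem.Dict.nodup_keys_foldl_modify_key P Prod.fst []
      (fun _ p => (fun items => items ++ [p.2])) _ PySem.Dict.nodup_keys_empty
  have hget : ∀ k, m.getD k [] = (P.filter (fun p => p.1 == k)).map (fun x => x.2) := by
    intro k
    rw [hm, PySem.Dict.getD_foldl_modify_append, PySem.Dict.getD_empty]
    rfl
  have hitems : m.items = m.keys.map (fun k => (k, m.getD k [])) :=
    PySem.Dict.items_eq_map_keys m hnd []
  have hfst : m.items.map Prod.fst = m.keys := by
    rw [hitems, List.map_map]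
    have h : (Prod.fst ∘ fun k : String => (k, m.getD k [])) = fun k => k := rfl
    rw [h]; exact List.map_id' _
  set m2 : PySem.Dict String (List (List (String × String))) :=
    m.items.foldl (fun d p => d.insert p.1 (PySem.List.sorted p.2 (fun a => pvDate a) true)) m with hm2
  have hk2 : m2.keys = m.keys := by
    rw [hm2, PySem.Dict.keys_foldl_insert_key m.items Prod.fst (fun _ p => PySem.List.sorted p.2 (fun a => pvDate a) true) m, hfst,
      PySem.Set.update_eq_append_filter]
    have hnil : (PySem.Set.ofList m.keys).filter (fun y => !(PySem.Set.contains m.keys y)) = [] := by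
      apply List.filter_eq_nil_iff.mpr
      intro y hy
      have : y ∈ m.keys := (PySem.Set.mem_ofList _ _).mp hy
      simp [PySem.Set.contains, this]
    rw [hnil, List.append_nil]
  have hnd2 : m2.keys.Nodup := hk2 ▸ hnd
  have hget2 : ∀ k ∈ m.keys,
      m2.get? k = some (PySem.List.sorted (m.getD k []) (fun a => pvDate a) true) := by
    intro k hkmem
    rw [hm2]
    exact pvL2 (fun v => PySem.List.sorted v (fun a => pvDate a) true) m.items m k (m.getD k [])
      (hfst ▸ hnd) (by rw [hitems]; exact List.mem_map_of_mem hkmem)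
  have hA : m2.items
      = m.keys.map (fun k => (k, PySem.List.sorted (m.getD k []) (fun a => pvDate a) true)) := by
    rw [PySem.Dict.items_eq_map_keys m2 hnd2 [], hk2]
    apply List.map_congr_left
    intro k hkmem
    rw [PySem.Dict.getD_eq_get?_getD, hget2 k hkmem]
    rfl
  have hkeyed : (activities.map (fun a => (pvKeyOf a, a))).map Prod.fst = activities.map pvKeyOf := by
    rw [List.map_map]; rfl
  set keyed := activities.map (fun a => (pvKeyOf a, a)) with hky
  set ks := PySem.List.dedup ((keyed.map Prod.fst).filter (fun k => k ≠ "")) with hks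
  have hkeysB : m.keys = ks := by
    rw [hkeys, ← PySem.List.dedup_eq_ofList, hP, pvL4, hks, hky, hkeyed]
  have hB : (ks.foldl (fun d k => d.insert k (PySem.List.sorted
        ((keyed.filter (fun p => p.1 == k)).map Prod.snd) (fun a => pvDate a) true))
        PySem.Dict.empty).items
      = ks.map (fun k => (k, PySem.List.sorted
        ((keyed.filter (fun p => p.1 == k)).map Prod.snd) (fun a => pvDate a) true)) := by
    rw [PySem.Dict.items_foldl_insert_fresh ks (fun k => k) _ PySem.Dict.empty
      (fun a _ => PySem.Dict.contains_empty a)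
      (by
        have hnd' : ks.Nodup := hks ▸ PySem.List.nodup_dedup _
        simpa using hnd')]
    rfl
  rw [hA, hB, hkeysB]
  apply List.map_congr_left
  intro k hkmem
  have hkne : k ≠ "" := by
    rw [hks] at hkmem
    have h1 := (PySem.List.mem_dedup _ _).mp hkmem
    have h2 := List.of_mem_filter h1
    simpa using h2
  rw [hget k, hP, pvL5 activities k hkne]
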